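-- pv_equiv track=rewrite | github.com/omer-ege-ozkaya/infix-to-assembly-generator | infix-to-assembly.py | find_first_number_block
-- ===== SOURCE A (Python) =====
-- def ishex(char: chr) -> bool:
--     """
--     Return whether the char is a legitimate hex digit or not.
--
--     Parameters
--     ----------
--     char : chr
--         character to be tested.
--
--     Returns
--     -------
--     bool
--         true if character is a legitimate hex digit, else false.
--
--     """
--     return char.isdigit() or char in "abcdef"
--
-- def find_first_number_block(text: str) -> (int, int):
--     """
--     Return the beginning and ending indexes of the first complete number block.
--
--     Parameters
--     ----------
--     text : str
--         infix string.
--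
--     Returns
--     -------
--     (int, int)
--         beginning, ending.
--     """
--     start_of_number_block = None
--     end_of_number_block = None
--     for i, char in enumerate(text):
--         if ishex(char):
--             if start_of_number_block is None:
--                 start_of_number_block = i
--         elif start_of_number_block is not None:
--             end_of_number_block = i - 1
--             break
--     if start_of_number_block is not None and end_of_number_block is None:
--         end_of_number_block = i
--     return start_of_number_block, end_of_number_block
-- ===== SOURCE B (Python) =====
-- def ishex(char):
--     return char.isdigit() or char in "abcdef"
--
-- def find_first_number_block(text):
--     # Stage 1: run-length encode the ishex classification of the whole string.
--     runs = []
--     for c in text: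
--         k = ishex(c)
--         if runs and runs[-1][0] == k:
--             runs[-1][1] += 1
--         else:
--             runs.append([k, 1])
--     # Stage 2: walk the runs, tracking each run's starting offset.
--     offset = 0
--     for k, n in runs:
--         if k:
--             return offset, offset + n - 1
--         offset += n
--     return None, None
-- ===== Notes on version B (the rewrite author's own statement) =====
-- stated objective: alternative
-- what changed: Replaces A's flag-carrying character loop with break and post-loop end fixup by a two-stage pipeline over a different intermediate data structure: first build a run-length encoding of the ishex classification of the whole string, then scan the run list with a running offset to report the first hex run.
import Mathlib
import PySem

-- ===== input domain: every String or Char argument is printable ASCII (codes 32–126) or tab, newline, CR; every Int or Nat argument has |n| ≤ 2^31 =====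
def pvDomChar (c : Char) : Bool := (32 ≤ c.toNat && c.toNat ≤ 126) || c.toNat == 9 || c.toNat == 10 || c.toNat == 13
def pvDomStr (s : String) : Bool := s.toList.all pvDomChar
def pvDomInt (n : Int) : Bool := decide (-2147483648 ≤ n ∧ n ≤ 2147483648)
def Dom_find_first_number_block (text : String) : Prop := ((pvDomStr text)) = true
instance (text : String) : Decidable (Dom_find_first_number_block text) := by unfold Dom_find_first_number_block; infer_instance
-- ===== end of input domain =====

-- B replaces A's flag-carrying loop-with-break (plus post-loop end fixup) by a two-stage
-- pipeline over a run-length encoding of the ishex classification; objective: alternative.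

-- ===== PORT A =====
-- ishex: char.isdigit() or char in "abcdef"
def ishex (c : Char) : Bool := PySem.Chars.isdigit c || "abcdef".toList.contains c

-- A's for-loop over enumerate(text) with the break and the post-loop fixup:
-- i is the next enumeration index; start? is start_of_number_block.
-- On break (non-hex char with start set) end = i - 1; after a completed loop with
-- start set, end = last index = i - 1 (same expression since i here is the next index).
def loopA (cs : List Char) (i : Int) (start? : Option Int) : Option Int × Option Int :=
  match cs with
  | [] =>
    match start? with
    | some s => (some s, some (i - 1))
    | none => (none, none)
  | c :: rest =>
    if ishex c then
      match start? with
      | some s => loopA rest (i + 1) (some s)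
      | none => loopA rest (i + 1) (some i)
    else
      match start? with
      | some s => (some s, some (i - 1))
      | none => loopA rest (i + 1) none

def find_first_number_block (text : String) : Option Int × Option Int :=
  loopA text.toList 0 none

-- ===== PORT B =====
-- Stage 1 of Source B: for each char, either bump the count of the last run (runs[-1][1] += 1)
-- or append a fresh run [k, 1].
def altStep (runs : List (Bool × Int)) (c : Char) : List (Bool × Int) :=
  let k := ishex c
  match runs.getLast? with
  | some (k', n) => if k' == k then runs.dropLast ++ [(k', n + 1)] else runs ++ [(k, 1)]
  | none => [(k, 1)]

-- runs after the first for-loop of Source B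
def altRuns (cs : List Char) : List (Bool × Int) := cs.foldl altStep []

-- Stage 2 of Source B: walk the runs with a running offset; return at the first hex run.
def altScan (runs : List (Bool × Int)) (offset : Int) : Option Int × Option Int :=
  match runs with
  | [] => (none, none)
  | (k, n) :: rest => if k then (some offset, some (offset + n - 1)) else altScan rest (offset + n)

def find_first_number_block_alt (text : String) : Option Int × Option Int :=
  altScan (altRuns text.toList) 0

-- ===== PRECONDITION & SPEC =====
def Spec_find_first_number_block (text : String) (out : Option Int × Option Int) : Prop := out = find_first_number_block_alt text
instance (text : String) (out : Option Int × Option Int) : Decidable (Spec_find_first_number_block text out) := by unfold Spec_find_first_number_block; infer_instance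

-- ===== CLAIM (what is proved, stated in full; the proofs are below) =====
def Claim_equal_find_first_number_block : Prop := ∀ (text : String), Dom_find_first_number_block text → Spec_find_first_number_block text (find_first_number_block text)

-- ===== LEMMAS AND PROOFS =====

-- Proof-only helpers: the find-start / extend-end characterisation both ports are reduced to.
def fS (cs : List Char) (i : Int) : Option (Int × List Char) :=
  match cs with
  | [] => none
  | c :: rest => if ishex c then some (i, rest) else fS rest (i + 1)

def ext (cs : List Char) (e : Int) : Int :=
  match cs with
  | [] => e
  | c :: rest => if ishex c then ext rest (e + 1) else e

def charac (cs : List Char) (i : Int) : Option Int × Option Int :=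
  match fS cs i with
  | none => (none, none)
  | some (s, rest) => (some s, some (ext rest s))

-- A-side, phase 2: once start s is set, A's loop just extends the end.
theorem loopA_some (cs : List Char) : ∀ (e s : Int),
    loopA cs (e + 1) (some s) = (some s, some (ext cs e)) := by
  induction cs with
  | nil => intro e s; simp [loopA, ext]
  | cons c rest ih =>
    intro e s
    by_cases h : ishex c = true
    · simp [loopA, ext, h, ih (e + 1) s]
    · simp [loopA, ext, h]

-- A-side, phase 1: while start is unset, A's loop agrees with the characterisation.
theorem loopA_none (cs : List Char) : ∀ (i : Int), loopA cs i none = charac cs i := by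
  induction cs with
  | nil => intro i; simp [loopA, charac, fS]
  | cons c rest ih =>
    intro i
    by_cases h : ishex c = true
    · simp [loopA, charac, fS, h, loopA_some rest i i]
    · simp only [loopA, h]
      rw [ih (i + 1)]
      simp [charac, fS, h]

-- B-side: a recursive description of altStep folded from a single open run (k, n).
def rleF (k : Bool) (n : Int) (cs : List Char) : List (Bool × Int) :=
  match cs with
  | [] => [(k, n)]
  | c :: rest => if ishex c = k then rleF k (n + 1) rest else (k, n) :: rleF (ishex c) 1 rest

-- altStep never touches runs strictly before the last one.
theorem foldl_altStep_append (cs : List Char) : ∀ (pre : List (Bool × Int)) (r : Bool × Int),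
    List.foldl altStep (pre ++ [r]) cs = pre ++ List.foldl altStep [r] cs := by
  induction cs with
  | nil => intro pre r; simp
  | cons c rest ih =>
    intro pre r
    obtain ⟨k', n⟩ := r
    simp only [List.foldl, altStep, List.getLast?_concat, List.getLast?_singleton]
    by_cases h : (k' == ishex c) = true
    · rw [if_pos h, if_pos h, List.dropLast_concat]
      simpa using ih pre (k', n + 1)
    · rw [if_neg h, if_neg h, ih (pre ++ [(k', n)]) (ishex c, 1),
        ih [(k', n)] (ishex c, 1)]
      simp

-- The fold from one open run computes rleF.
theorem foldl_altStep_rleF (cs : List Char) : ∀ (k : Bool) (n : Int),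
    List.foldl altStep [(k, n)] cs = rleF k n cs := by
  induction cs with
  | nil => intro k n; simp [rleF]
  | cons c rest ih =>
    intro k n
    by_cases h : ishex c = k
    · simp [List.foldl, altStep, rleF, h, ih]
    · have h' : (k == ishex c) = false := by
        cases k <;> cases hc : ishex c <;> simp_all
      have e1 : List.foldl altStep [(k, n)] (c :: rest) =
          List.foldl altStep ([(k, n)] ++ [(ishex c, 1)]) rest := by
        simp [List.foldl, altStep, h']
      rw [e1, foldl_altStep_append rest [(k, n)] (ishex c, 1), ih (ishex c) 1]
      simp [rleF, h]

-- The run list of c :: rest is the fold-from-one-open-run form.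
theorem altRuns_cons (c : Char) (rest : List Char) :
    altRuns (c :: rest) = rleF (ishex c) 1 rest := by
  simp [altRuns, List.foldl, altStep, foldl_altStep_rleF]

-- Scanning runs opened by a non-hex run just shifts the offset.
theorem altScan_rleF_false (cs : List Char) : ∀ (n off : Int),
    altScan (rleF false n cs) off = altScan (altRuns cs) (off + n) := by
  induction cs with
  | nil => intro n off; simp [rleF, altScan, altRuns]
  | cons c rest ih =>
    intro n off
    by_cases h : ishex c = true
    · have e : rleF false n (c :: rest) = (false, n) :: rleF true 1 rest := by
        rw [rleF, h]; simp
      rw [e, altRuns_cons, h]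
      simp [altScan]
    · have h' : ishex c = false := by simpa using h
      have e : rleF false n (c :: rest) = rleF false (n + 1) rest := by
        rw [rleF, h']; simp
      have e2 : off + (n + 1) = off + n + 1 := by ring
      rw [e, ih (n + 1) off, altRuns_cons, h', ih 1 (off + n), e2]

-- Scanning runs opened by a hex run of length n returns (off, end of the hex block).
theorem altScan_rleF_true (cs : List Char) : ∀ (n off : Int),
    altScan (rleF true n cs) off = (some off, some (ext cs (off + n - 1))) := by
  induction cs with
  | nil => intro n off; simp [rleF, altScan, ext]
  | cons c rest ih =>
    intro n off
    by_cases h : ishex c = true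
    · have e : rleF true n (c :: rest) = rleF true (n + 1) rest := by
        rw [rleF, h]; simp
      have e1 : off + (n + 1) - 1 = off + n - 1 + 1 := by ring
      rw [e, ih (n + 1) off, e1]
      simp [ext, h]
    · have h' : ishex c = false := by simpa using h
      have e : rleF true n (c :: rest) = (true, n) :: rleF false 1 rest := by
        rw [rleF, h']; simp
      rw [e]
      simp [altScan, ext, h']

-- B equals the characterisation.
theorem alt_eq_charac (cs : List Char) : ∀ (off : Int),
    altScan (altRuns cs) off = charac cs off := by
  induction cs with
  | nil => intro off; simp [altRuns, altScan, charac, fS]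
  | cons c rest ih =>
    intro off
    by_cases h : ishex c = true
    · have e1 : off + 1 - 1 = off := by ring
      rw [altRuns_cons, h, altScan_rleF_true rest 1 off, e1]
      simp [charac, fS, h]
    · have h' : ishex c = false := by simpa using h
      rw [altRuns_cons, h', altScan_rleF_false rest 1 off, ih (off + 1)]
      simp [charac, fS, h']

-- ===== VERDICT (by name: the statement is the Claim_ definition above) =====
theorem find_first_number_block_spec : Claim_equal_find_first_number_block := by
  intro text _
  unfold Spec_find_first_number_block find_first_number_block find_first_number_block_alt
  rw [loopA_none text.toList 0, alt_eq_charac text.toList 0]
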